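-- pv_equiv track=rewrite | github.com/BuddyAnonymous/Breakthrough-Engine | main.py | _sum_table_for_bitboard
-- ===== SOURCE A (Python) =====
-- def _sum_table_for_bitboard(bb, table):
--     s = 0
--     while bb:
--         lsb = bb & -bb
--         idx = lsb.bit_length() - 1
--         s += table[idx]
--         bb ^= lsb
--     return s
-- ===== SOURCE B (Python) =====
-- def _sum_table_for_bitboard(bb, table):
--     return sum(table[i] for i in range(bb.bit_length()) if (bb >> i) & 1)
-- ===== Notes on version B (the rewrite author's own statement) =====
-- stated objective: alternative
-- what changed: B sums table entries over range(bb.bit_length()) with a bit test (bb >> i) & 1 in a single comprehension, instead of A's while-loop that repeatedly isolates the lowest set bit with bb & -bb, derives its index via bit_length, and clears it with xor.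
import Mathlib
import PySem

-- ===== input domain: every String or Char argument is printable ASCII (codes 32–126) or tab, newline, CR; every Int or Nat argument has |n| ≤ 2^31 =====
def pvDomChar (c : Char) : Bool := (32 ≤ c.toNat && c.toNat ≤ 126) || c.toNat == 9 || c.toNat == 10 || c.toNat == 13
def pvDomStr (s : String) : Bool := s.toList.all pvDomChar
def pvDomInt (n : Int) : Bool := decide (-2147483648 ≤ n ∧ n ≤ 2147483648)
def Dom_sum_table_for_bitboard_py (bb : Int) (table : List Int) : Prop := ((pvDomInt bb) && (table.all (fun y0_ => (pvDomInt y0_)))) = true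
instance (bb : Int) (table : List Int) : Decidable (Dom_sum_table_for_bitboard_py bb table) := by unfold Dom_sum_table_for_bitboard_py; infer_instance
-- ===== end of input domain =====

-- B replaces A's loop over the set bits of bb (lowest-set-bit isolation via bb & -bb,
-- index via bit_length, clearing via xor) by one comprehension over range(bb.bit_length())
-- that tests bit i with (bb >> i) & 1: a different decomposition, similar cost.


-- ===== PORT A =====
-- while bb: lsb = bb & -bb; idx = lsb.bit_length() - 1; s += table[idx]; bb ^= lsb
-- fuel (= bb.toNat + 1) only makes the loop total; inside Pre_ it never runs out,
-- since each iteration strictly decreases the (nonnegative) bitboard.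
def pvALoop (table : List Int) : Nat → Int → Int → Int
  | 0, _, s => s
  | fuel + 1, bb, s =>
    if bb = 0 then s
    else
      let lsb := PySem.Int.band bb (-bb)
      let idx : Int := (PySem.Int.bitLength lsb : Int) - 1
      pvALoop table fuel (PySem.Int.bxor bb lsb) (s + PySem.List.pyGetD table idx 0)

def sum_table_for_bitboard_py (bb : Int) (table : List Int) : Int :=
  pvALoop table (bb.toNat + 1) bb 0

-- ===== PORT B =====
-- sum(table[i] for i in range(bb.bit_length()) if (bb >> i) & 1)
-- table[i] is only evaluated when the bit is set; inside Pre_ that index is in range,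
-- so pyGetD's default is never taken (out-of-range table[i] raises, excluded by Pre_).
def sum_table_for_bitboard_py_alt (bb : Int) (table : List Int) : Int :=
  (PySem.List.pyRange 0 (PySem.Int.bitLength bb)).foldl
    (fun s i => if PySem.Int.band (bb >>> i) 1 ≠ 0 then s + PySem.List.pyGetD table i 0 else s) 0

-- ===== PRECONDITION & SPEC =====
-- exactly the inputs on which the Python A returns: a negative bb loops forever,
-- and a set bit at position ≥ len(table) raises IndexError (bb < 2^len(table) ↔ none).
def Pre_sum_table_for_bitboard_py (bb : Int) (table : List Int) : Prop :=
  0 ≤ bb ∧ bb < 2 ^ table.length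

instance (bb : Int) (table : List Int) : Decidable (Pre_sum_table_for_bitboard_py bb table) := by
  unfold Pre_sum_table_for_bitboard_py; infer_instance

def pvWitness_sum_table_for_bitboard_py : Int × List Int := (5, [1, 2, 3])

def Spec_sum_table_for_bitboard_py (bb : Int) (table : List Int) (out : Int) : Prop :=
  out = sum_table_for_bitboard_py_alt bb table

instance (bb : Int) (table : List Int) (out : Int) : Decidable (Spec_sum_table_for_bitboard_py bb table out) := by
  unfold Spec_sum_table_for_bitboard_py; infer_instance

-- ===== CLAIM (what is proved, stated in full; the proofs are below) =====
def Claim_equal_sum_table_for_bitboard_py : Prop := ∀ (bb : Int) (table : List Int), Dom_sum_table_for_bitboard_py bb table → Pre_sum_table_for_bitboard_py bb table → Spec_sum_table_for_bitboard_py bb table (sum_table_for_bitboard_py bb table)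

-- ===== LEMMAS AND PROOFS =====

-- reference value: sum of table entries at the set-bit positions of n, read from bit idx up
def pvBits (table : List Int) (n idx : Nat) : Int :=
  if n = 0 then 0
  else (if n % 2 = 1 then table.getD idx 0 else 0) + pvBits table (n / 2) (idx + 1)
  termination_by n
  decreasing_by exact Nat.div_lt_self (by omega) (by omega)

theorem pvBits_zero (table : List Int) (idx : Nat) : pvBits table 0 idx = 0 := by
  rw [pvBits]; simp

theorem pvBits_even (table : List Int) (k idx : Nat) :
    pvBits table (2 * k) idx = pvBits table k (idx + 1) := by
  rcases Nat.eq_zero_or_pos k with h | h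
  · simp [h, pvBits_zero]
  · rw [pvBits]
    have h2 : 2 * k ≠ 0 := by omega
    simp [h2, Nat.mul_div_cancel_left k (by omega : 0 < 2), Nat.mul_mod_right]

theorem pvBits_odd (table : List Int) (k idx : Nat) :
    pvBits table (2 * k + 1) idx = table.getD idx 0 + pvBits table k (idx + 1) := by
  rw [pvBits]
  have h1 : (2 * k + 1) % 2 = 1 := by omega
  have h2 : (2 * k + 1) / 2 = k := by omega
  simp [h1, h2]

-- bit-level halving identities, from Nat.land_bit / Nat.xor_bit
theorem pv_land_oe (m k : Nat) : (2 * m + 1) &&& (2 * k) = 2 * (m &&& k) := by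
  simpa [Nat.bit_val] using Nat.land_bit true m false k

theorem pv_land_eo (m k : Nat) : (2 * m) &&& (2 * k + 1) = 2 * (m &&& k) := by
  simpa [Nat.bit_val] using Nat.land_bit false m true k

theorem pv_xor_ee (m k : Nat) : (2 * m) ^^^ (2 * k) = 2 * (m ^^^ k) := by
  simpa [Nat.bit_val] using Nat.xor_bit false m false k

theorem pv_xor_oo (m k : Nat) : (2 * m + 1) ^^^ (2 * k + 1) = 2 * (m ^^^ k) := by
  simpa [Nat.bit_val] using Nat.xor_bit true m true k

-- the core facts about clearing the lowest set bit, by strong induction on n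
theorem pv_core (n : Nat) (hn : 0 < n) :
    n ^^^ (n - (n &&& (n - 1))) = n &&& (n - 1) ∧
    1 ≤ n - (n &&& (n - 1)) ∧
    ∀ (table : List Int) (idx : Nat),
      pvBits table n idx =
        table.getD (idx + (PySem.Int.bitLength ((n - (n &&& (n - 1)) : Nat) : Int) - 1)) 0
          + pvBits table (n &&& (n - 1)) idx := by
  induction n using Nat.strong_induction_on with
  | _ n ih =>
    rcases Nat.even_or_odd n with ⟨m, hm⟩ | ⟨m, hm⟩
    · -- n = 2 * m, m > 0
      have hm2 : n = 2 * m := by omega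
      have hmpos : 0 < m := by omega
      obtain ⟨ixor, ipos, ibits⟩ := ih m (by omega) hmpos
      have hle : m &&& (m - 1) ≤ m - 1 := Nat.and_le_right
      have hand : n &&& (n - 1) = 2 * (m &&& (m - 1)) := by
        rw [show n - 1 = 2 * (m - 1) + 1 from by omega, hm2, pv_land_eo]
      have hl : n - (n &&& (n - 1)) = 2 * (m - (m &&& (m - 1))) := by
        rw [hand]; omega
      have hbl : PySem.Int.bitLength ((2 * (m - (m &&& (m - 1))) : Nat) : Int)
          = PySem.Int.bitLength ((m - (m &&& (m - 1)) : Nat) : Int) + 1 := by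
        rw [PySem.Int.bitLength_natCast (by omega)]
        congr 2
        omega
      have hblpos : 1 ≤ PySem.Int.bitLength ((m - (m &&& (m - 1)) : Nat) : Int) := by
        rw [PySem.Int.bitLength_natCast (by omega)]; omega
      refine ⟨?_, by omega, ?_⟩
      · rw [hand, show n - 2 * (m &&& (m - 1)) = 2 * (m - (m &&& (m - 1))) from by omega,
          hm2, pv_xor_ee, ixor]
      · intro table idx
        rw [hl, hand, hbl]
        rw [hm2, pvBits_even, ibits table (idx + 1), pvBits_even]
        congr 2
        omega
    · -- n = 2 * m + 1 (odd): lsb = 1, no IH needed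
      have hand : n &&& (n - 1) = 2 * m := by
        rw [show n - 1 = 2 * m from by omega, hm, pv_land_oe, Nat.and_self]
      have hl : n - (n &&& (n - 1)) = 1 := by
        rw [hand]; omega
      refine ⟨?_, by omega, ?_⟩
      · rw [hand, show n - 2 * m = 1 from by omega, hm,
          show (1 : Nat) = 2 * 0 + 1 from rfl, pv_xor_oo]
        simp
      · intro table idx
        rw [hl, hand]
        rw [show PySem.Int.bitLength ((1 : Nat) : Int) = 1 from by decide]
        rw [hm, pvBits_odd, pvBits_even]
        simp

-- Python's  bb & -bb  on a positive bitboard, in Nat terms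
theorem pv_band_neg (n : Nat) (hn : 0 < n) :
    PySem.Int.band (n : Int) (-(n : Int)) = ((n - (n &&& (n - 1)) : Nat) : Int) := by
  have h1 : ((n : Int)).toNat = n := Int.toNat_natCast n
  have h2 : (-(-(n : Int)) - 1).toNat = n - 1 := by omega
  rw [PySem.Int.band, if_pos (by positivity), if_neg (by omega), h1, h2]

-- A's loop computes pvBits
theorem pvALoop_eq (table : List Int) :
    ∀ (fuel n : Nat) (s : Int), n < fuel →
      pvALoop table fuel (n : Int) s = s + pvBits table n 0 := by
  intro fuel
  induction fuel with
  | zero => intro n s h; omega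
  | succ fuel ih =>
    intro n s h
    rcases Nat.eq_zero_or_pos n with h0 | h0
    · subst h0; simp [pvALoop, pvBits_zero]
    · obtain ⟨ixor, ipos, ibits⟩ := pv_core n h0
      have hne : (n : Int) ≠ 0 := by exact_mod_cast Nat.pos_iff_ne_zero.mp h0
      rw [pvALoop]
      simp only [hne, if_false, pv_band_neg n h0]
      set l : Nat := n - (n &&& (n - 1)) with hldef
      have hblpos : 1 ≤ PySem.Int.bitLength ((l : Nat) : Int) := by
        rw [PySem.Int.bitLength_natCast (show 0 < l from by omega)]; omega
      have hxor : PySem.Int.bxor (n : Int) (l : Int) = ((n &&& (n - 1) : Nat) : Int) := by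
        rw [show ((l : Nat) : Int) = ((l : Nat) : Int) from rfl]
        rw [PySem.Int.bxor_natCast, ixor]
      have hidx : ((PySem.Int.bitLength ((l : Nat) : Int) : Int) - 1)
          = ((PySem.Int.bitLength ((l : Nat) : Int) - 1 : Nat) : Int) := by omega
      rw [hxor, hidx, PySem.List.pyGetD_natCast]
      have hlt : (n &&& (n - 1)) < fuel := by
        have : n &&& (n - 1) ≤ n - 1 := Nat.and_le_right
        omega
      rw [ih (n &&& (n - 1)) _ hlt, ibits table 0]
      simp
      ring

-- pvBits unfolded one step, valid also at 0
theorem pvBits_step (table : List Int) (m idx : Nat) :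
    pvBits table m idx = (if m % 2 = 1 then table.getD idx 0 else 0) + pvBits table (m / 2) (idx + 1) := by
  rcases Nat.eq_zero_or_pos m with h0 | h0
  · simp [h0, pvBits_zero]
  · rw [pvBits]
    simp [Nat.pos_iff_ne_zero.mp h0]

-- B's fold over range(i, i+k) computes pvBits of the bitboard shifted by i,
-- provided k covers all remaining set bits (n / 2^i < 2^k)
theorem pvBFold (table : List Int) (n : Nat) :
    ∀ (k i : Nat) (s : Int), n / 2 ^ i < 2 ^ k →
      (PySem.List.pyRange (i : Int) ((i + k : Nat) : Int)).foldl
        (fun s j => if PySem.Int.band ((n : Int) >>> j) 1 ≠ 0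
            then s + PySem.List.pyGetD table j 0 else s) s
      = s + pvBits table (n / 2 ^ i) i := by
  intro k
  induction k with
  | zero =>
    intro i s h
    have hm : n / 2 ^ i = 0 := Nat.lt_one_iff.mp (by rw [pow_zero] at h; exact h)
    have hr : PySem.List.pyRange (i : Int) ((i + 0 : Nat) : Int) = [] := by
      simp [PySem.List.pyRange]
    rw [hr, hm, pvBits_zero]
    simp
  | succ k ih =>
    intro i s h
    have hcons : PySem.List.pyRange (i : Int) ((i + (k + 1) : Nat) : Int)
        = (i : Int) :: PySem.List.pyRange ((i : Int) + 1) ((i + (k + 1) : Nat) : Int) :=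
      PySem.List.pyRange_one_cons (by push_cast; omega)
    rw [hcons, List.foldl_cons]
    have hsh : (n : Int) >>> ((i : Nat) : Int) = ((n >>> i : Nat) : Int) :=
      Int.shiftRight_natCast n i
    have hb : PySem.Int.band ((n >>> i : Nat) : Int) 1 = ((n >>> i) &&& 1 : Nat) := by
      exact_mod_cast PySem.Int.band_natCast (n >>> i) 1
    have hbit : (n >>> i) &&& 1 = (n / 2 ^ i) % 2 := by
      rw [Nat.and_one_is_mod, Nat.shiftRight_eq_div_pow]
    have hi1 : ((i : Nat) : Int) + 1 = (((i + 1) : Nat) : Int) := by push_cast; ring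
    have hik : (i + (k + 1) : Nat) = ((i + 1) + k : Nat) := by omega
    have hdiv : n / 2 ^ i / 2 = n / 2 ^ (i + 1) := by
      rw [Nat.div_div_eq_div_mul, pow_succ]
    have hlt : n / 2 ^ (i + 1) < 2 ^ k := by
      rw [← hdiv]; omega
    rw [hsh, hb, hbit, PySem.List.pyGetD_natCast, hi1, hik, ih (i + 1) _ hlt,
      pvBits_step table (n / 2 ^ i) i, hdiv]
    rcases Nat.mod_two_eq_zero_or_one (n / 2 ^ i) with hp | hp
    · rw [hp, if_neg (by norm_num), if_neg (by norm_num)]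
      ring
    · rw [hp, if_pos (by norm_num), if_pos (by norm_num)]
      ring

-- ===== VERDICT (by name: the statement is the Claim_ definition above) =====
theorem sum_table_for_bitboard_py_spec : Claim_equal_sum_table_for_bitboard_py := by
  intro bb table _ hpre
  obtain ⟨hb, _⟩ := hpre
  unfold Spec_sum_table_for_bitboard_py
  unfold sum_table_for_bitboard_py sum_table_for_bitboard_py_alt
  have hbb : bb = ((bb.toNat : Nat) : Int) := (Int.toNat_of_nonneg hb).symm
  have hA := pvALoop_eq table (bb.toNat + 1) bb.toNat 0 (by omega)
  have hlt : bb.toNat / 2 ^ 0 < 2 ^ PySem.Int.bitLength ((bb.toNat : Nat) : Int) := by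
    have h1 := PySem.Int.lt_two_pow_bitLength ((bb.toNat : Nat) : Int)
    rw [Int.natAbs_natCast] at h1
    rw [pow_zero, Nat.div_one]
    exact h1
  have hB := pvBFold table bb.toNat (PySem.Int.bitLength ((bb.toNat : Nat) : Int)) 0 0 hlt
  simp only [pow_zero, Nat.div_one, Nat.cast_zero, zero_add] at hB
  rw [hbb, Int.toNat_natCast, hA, hB, zero_add]
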